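-- pv_equiv track=rewrite | github.com/RealCAnders/2020_CA-Thesis | data_prep/prep_dat_final.py | identify_triggers
-- ===== SOURCE A (Python) =====
-- def identify_triggers(trigger_signal, estimated_trigger_distance, indicator_value):
--
--     # 1st version: define the timestamp when the signal is at zero again as "start of trigger"
--     triggers = [0]
--     ttl_found = False
--     ttl_samples_ctr = 0
--
--     for idx, data_point in enumerate(trigger_signal):
--         if triggers[-1] + int(0.9 * estimated_trigger_distance) <= idx and trigger_signal[idx] == indicator_value:
--             ttl_found = True
--             ttl_samples_ctr = ttl_samples_ctr + 1
--         else: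
--             ttl_found = False
--         if ttl_samples_ctr > 0 and not ttl_found:
--             triggers.append(idx + 40) # -1 as to change of index for old position; -41 as to offset-correciton
--             ttl_samples_ctr = 0
--
--     return triggers[1:]
-- ===== SOURCE B (Python) =====
-- def identify_triggers(trigger_signal, estimated_trigger_distance, indicator_value):
--     # Run-scanner: group each maximal run of indicator values, record one
--     # trigger per run that ends before the end of the signal and whose last
--     # index clears the distance gate measured from the last recorded trigger.
--     gap = int(0.9 * estimated_trigger_distance)
--     n = len(trigger_signal)
--     out = []
--     last = 0
--     i = 0
--     while i < n:
--         if trigger_signal[i] != indicator_value: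
--             i += 1
--             continue
--         j = i
--         while j < n and trigger_signal[j] == indicator_value:
--             j += 1
--         if j < n and last + gap <= j - 1:
--             out.append(j + 40)
--             last = j + 40
--         i = j + 1
--     return out
-- ===== Notes on version B (the rewrite author's own statement) =====
-- stated objective: faster
-- what changed: Replaces A's per-element found/counter flag machinery over enumerate with a run-scanner that consumes each maximal run of indicator values in a tight inner loop and records one trigger per run that ends before the end of the signal and clears the distance gate.
import Mathlib
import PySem

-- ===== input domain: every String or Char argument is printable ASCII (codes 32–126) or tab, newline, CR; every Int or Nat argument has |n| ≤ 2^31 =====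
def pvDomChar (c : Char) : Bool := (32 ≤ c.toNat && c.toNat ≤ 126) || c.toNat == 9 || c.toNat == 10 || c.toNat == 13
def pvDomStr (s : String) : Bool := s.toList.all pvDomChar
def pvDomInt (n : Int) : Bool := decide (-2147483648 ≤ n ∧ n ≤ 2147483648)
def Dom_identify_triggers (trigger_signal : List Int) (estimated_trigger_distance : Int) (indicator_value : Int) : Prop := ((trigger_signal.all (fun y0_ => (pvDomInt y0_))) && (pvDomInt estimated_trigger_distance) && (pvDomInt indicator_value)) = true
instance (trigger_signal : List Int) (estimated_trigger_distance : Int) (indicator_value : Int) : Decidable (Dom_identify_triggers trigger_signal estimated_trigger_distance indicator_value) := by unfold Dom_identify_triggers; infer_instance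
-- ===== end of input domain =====

-- B re-implements A as a run-scanner over maximal runs of the indicator value
-- (same O(n), lower constant: no per-element flag bookkeeping); returns A's exact value.

-- ===== PORT A =====
-- int(0.9 * d): exact for |d| ≤ 2^31 (0.9*d in float is within 3e-7 of 9d/10,
-- whose distance to any other integer is ≥ 0.1), so it equals (9*d).tdiv 10.
def pvGap (d : Int) : Int := (9 * d).tdiv 10

def aStep (gap iv : Int) (st : List Int × Int) (p : Int × Int) : List Int × Int :=
  let triggers := st.1
  let ctr0 := st.2
  let idx := p.1
  let x := p.2
  let found : Bool := decide (triggers.getLast! + gap ≤ idx ∧ x = iv)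
  let ctr := if found then ctr0 + 1 else ctr0
  if ctr > 0 ∧ found = false then (triggers ++ [idx + 40], 0) else (triggers, ctr)

def identify_triggers (trigger_signal : List Int) (estimated_trigger_distance : Int) (indicator_value : Int) : List Int :=
  let st := List.foldl (aStep (pvGap estimated_trigger_distance) indicator_value)
              ([0], 0) (PySem.List.enumerate trigger_signal 0)
  st.1.drop 1   -- triggers[1:]

-- ===== PORT B =====
def runLen (iv : Int) : List Int → Nat
  | [] => 0
  | x :: r => if x = iv then runLen iv r + 1 else 0

def bGo (gap iv : Int) (l : List Int) (i last : Int) : List Int :=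
  match l with
  | [] => []
  | x :: rest =>
    if x = iv then
      let k := runLen iv rest
      let rest' := rest.drop k
      if rest'.isEmpty then []  -- run reaches the end: no trigger
      else
        let j := i + 1 + k      -- index just past the maximal run
        if last + gap ≤ j - 1 then
          (j + 40) :: bGo gap iv rest'.tail (j + 1) (j + 40)
        else
          bGo gap iv rest'.tail (j + 1) last
    else bGo gap iv rest (i + 1) last
termination_by l.length
decreasing_by
  · simp [List.length_drop]
  · simp [List.length_drop]
  · simp

def identify_triggers_alt (trigger_signal : List Int) (estimated_trigger_distance : Int) (indicator_value : Int) : List Int :=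
  bGo (pvGap estimated_trigger_distance) indicator_value trigger_signal 0 0

-- ===== PRECONDITION & SPEC =====
def Spec_identify_triggers (trigger_signal : List Int) (estimated_trigger_distance : Int) (indicator_value : Int) (out : List Int) : Prop := out = identify_triggers_alt trigger_signal estimated_trigger_distance indicator_value
instance (trigger_signal : List Int) (estimated_trigger_distance : Int) (indicator_value : Int) (out : List Int) : Decidable (Spec_identify_triggers trigger_signal estimated_trigger_distance indicator_value out) := by unfold Spec_identify_triggers; infer_instance

-- ===== CLAIM (what is proved, stated in full; the proofs are below) =====
def Claim_equal_identify_triggers : Prop := ∀ (trigger_signal : List Int) (estimated_trigger_distance : Int) (indicator_value : Int), Dom_identify_triggers trigger_signal estimated_trigger_distance indicator_value → Spec_identify_triggers trigger_signal estimated_trigger_distance indicator_value (identify_triggers trigger_signal estimated_trigger_distance indicator_value)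

-- ===== LEMMAS AND PROOFS =====

lemma getLast!_concat (acc : List Int) (v : Int) : (acc ++ [v]).getLast! = v := by
  induction acc with
  | nil => rfl
  | cons a t ih =>
      cases t with
      | nil => rfl
      | cons b u => simpa [List.getLast!] using ih

lemma runLen_le (iv : Int) (l : List Int) : runLen iv l ≤ l.length := by
  induction l with
  | nil => simp [runLen]
  | cons x r ih => simp [runLen]; split <;> omega

lemma mem_take_runLen (iv : Int) (l : List Int) :
    ∀ x ∈ l.take (runLen iv l), x = iv := by
  induction l with
  | nil => simp
  | cons x r ih =>
      by_cases hx : x = iv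
      · simp [runLen, hx] at *
        intro y hy
        exact ih y hy
      · simp [runLen, hx]

lemma drop_runLen_head (iv : Int) (l : List Int) {y : Int} {r' : List Int}
    (h : l.drop (runLen iv l) = y :: r') : y ≠ iv := by
  induction l generalizing r' with
  | nil => simp at h
  | cons x r ih =>
      by_cases hx : x = iv
      · simp [runLen, hx] at h
        exact ih h
      · simp [runLen, hx] at h
        intro hy; exact hx (hy ▸ h.1)

-- processing a pure run of indicator values: triggers unchanged, counter
-- becomes positive iff the run is nonempty and its last index clears the gate
lemma run_lemma (gap iv : Int) (run : List Int) :
    ∀ (i last ctr : Int) (acc : List Int),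
    (∀ x ∈ run, x = iv) → 0 ≤ ctr → (0 < ctr → last + gap ≤ i) →
    ∃ ctr', List.foldl (aStep gap iv) (acc ++ [last], ctr) (PySem.List.enumerate run i)
            = (acc ++ [last], ctr') ∧ 0 ≤ ctr' ∧
            (0 < ctr' ↔ (0 < ctr ∨ (run ≠ [] ∧ last + gap ≤ i + run.length - 1))) := by
  induction run with
  | nil =>
      intro i last ctr acc _ h0 _
      exact ⟨ctr, by simp [PySem.List.enumerate_nil], h0, by simp⟩
  | cons x rest ih =>
      intro i last ctr acc hall h0 hgate
      have hx : x = iv := hall x (by simp)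
      rw [PySem.List.enumerate_cons, List.foldl_cons]
      by_cases hf : last + gap ≤ i
      · -- found = True: counter incremented, no append
        have hstep : aStep gap iv (acc ++ [last], ctr) (i, x)
            = (acc ++ [last], ctr + 1) := by
          simp [aStep, getLast!_concat, hf, hx]
        rw [hstep]
        obtain ⟨ctr', heq, h0', hiff⟩ :=
          ih (i + 1) last (ctr + 1) acc (fun y hy => hall y (by simp [hy]))
            (by omega) (fun _ => by omega)
        refine ⟨ctr', heq, h0', ?_⟩
        simp at hiff ⊢
        omega
      · -- gate fails: found = False, and ctr must be 0, so no append
        have hctr : ctr = 0 := by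
          by_contra hne
          exact hf (hgate (by omega))
        subst hctr
        have hstep : aStep gap iv (acc ++ [last], 0) (i, x)
            = (acc ++ [last], 0) := by
          simp [aStep, getLast!_concat, hf, hx]
        rw [hstep]
        obtain ⟨ctr', heq, h0', hiff⟩ :=
          ih (i + 1) last 0 acc (fun y hy => hall y (by simp [hy]))
            le_rfl (by omega)
        refine ⟨ctr', heq, h0', ?_⟩
        simp at hiff ⊢
        rcases List.eq_nil_or_concat rest with hr | _
        · subst hr; simp at hiff ⊢; omega
        · constructor
          · intro h
            have := hiff.mp h
            rcases this with ⟨hne, hle⟩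
            simp [List.length_pos_iff] at *
            omega
          · intro hle
            apply hiff.mpr
            have : rest ≠ [] := by
              intro hr0; subst hr0; simp at hle; omega
            refine ⟨this, ?_⟩
            omega

lemma main_lemma (gap iv : Int) (n : Nat) :
    ∀ (l : List Int), l.length ≤ n → ∀ (i last : Int) (acc : List Int),
    (List.foldl (aStep gap iv) (acc ++ [last], 0) (PySem.List.enumerate l i)).1
      = (acc ++ [last]) ++ bGo gap iv l i last := by
  induction n with
  | zero =>
      intro l hl i last acc
      have : l = [] := by cases l <;> simp_all
      subst this
      simp [PySem.List.enumerate_nil, bGo]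
  | succ n ih =>
      intro l hl i last acc
      match l with
      | [] => simp [PySem.List.enumerate_nil, bGo]
      | x :: rest =>
        by_cases hx : x = iv
        · -- split off the maximal run x :: take k rest
          set k := runLen iv rest with hk
          have hkle : k ≤ rest.length := runLen_le iv rest
          have hsplit : x :: rest = (x :: rest.take k) ++ rest.drop k := by
            simp
          conv_lhs => rw [hsplit, PySem.List.enumerate_append, List.foldl_append]
          have hall : ∀ y ∈ x :: rest.take k, y = iv := by
            intro y hy
            rcases List.mem_cons.mp hy with h | h
            · exact h ▸ hx
            · exact mem_take_runLen iv rest y h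
          obtain ⟨ctr', heq, h0', hiff⟩ :=
            run_lemma gap iv (x :: rest.take k) i last 0 acc hall le_rfl (by omega)
          rw [heq]
          have hlen : ((x : Int) :: rest.take k).length = (k : ℕ) + 1 := by
            simp [List.length_take, Nat.min_eq_left hkle]
          rw [hlen]
          set j : Int := i + ((k : ℕ) + 1 : ℕ) with hj
          have hjval : j = i + 1 + (k : Int) := by simp [hj]; push_cast; ring
          match hdrop : rest.drop k with
          | [] =>
              simp only [PySem.List.enumerate_nil, List.foldl_nil, heq]
              conv_rhs => rw [bGo.eq_def]
              simp [hx, ← hk, hdrop]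
          | y :: rest'' =>
              have hy : y ≠ iv := drop_runLen_head iv rest (hk ▸ hdrop)
              have hlen'' : rest''.length + 1 = rest.length - k := by
                have := congrArg List.length hdrop
                simp [List.length_drop] at this
                omega
              rw [PySem.List.enumerate_cons, List.foldl_cons]
              -- at index j the element y is not the indicator: found = False
              have hfound : (decide ((acc ++ [last]).getLast! + gap ≤ j ∧ y = iv)) = false := by
                simp [hy]
              by_cases hctr : 0 < ctr'
              · -- trigger recorded
                have hiff' : last + gap ≤ i + ((k:Int)+1) - 1 := by
                  have := hiff.mp hctr
                  rcases this with h | ⟨_, hle⟩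
                  · omega
                  · simpa [hlen] using hle
                have hstep : aStep gap iv (acc ++ [last], ctr') (j, y)
                    = ((acc ++ [last]) ++ [j + 40], 0) := by
                  simp [aStep, getLast!_concat, hy]
                  omega
                rw [hstep]
                have := ih rest'' (by simp only [List.length_cons] at hl; omega) (j + 1) (j + 40) (acc ++ [last])
                rw [this]
                conv_rhs => rw [bGo.eq_def]
                simp only [hx, if_true, ← hk, hdrop, List.isEmpty_cons, List.tail_cons,
                  Bool.false_eq_true, if_false]
                rw [if_pos (by omega : last + gap ≤ i + 1 + (k:Int) - 1)]
                simp [hjval]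
              · -- gate not cleared: no trigger for this run
                have hctr0 : ctr' = 0 := by omega
                subst hctr0
                have hgate2 : ¬ (last + gap ≤ i + 1 + (k:Int) - 1) := by
                  intro hle
                  apply hctr
                  apply hiff.mpr
                  right
                  refine ⟨by simp, ?_⟩
                  rw [hlen]; push_cast at *; omega
                have hstep : aStep gap iv (acc ++ [last], 0) (j, y)
                    = (acc ++ [last], 0) := by
                  simp [aStep, getLast!_concat, hy]
                rw [hstep]
                have := ih rest'' (by simp only [List.length_cons] at hl; omega) (j + 1) last acc
                rw [this]
                conv_rhs => rw [bGo.eq_def]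
                simp only [hx, if_true, ← hk, hdrop, List.isEmpty_cons, List.tail_cons,
                  Bool.false_eq_true, if_false]
                rw [if_neg hgate2]
                simp [hjval]
        · -- non-indicator head: both skip it
          have hstep : aStep gap iv (acc ++ [last], 0) (i, x) = (acc ++ [last], 0) := by
            simp [aStep, getLast!_concat, hx]
          rw [PySem.List.enumerate_cons, List.foldl_cons, hstep]
          have := ih rest (by simpa using Nat.le_of_succ_le_succ hl) (i + 1) last acc
          rw [this]
          conv_rhs => rw [bGo.eq_def]
          simp [hx]

-- ===== VERDICT (by name: the statement is the Claim_ definition above) =====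
theorem identify_triggers_spec : Claim_equal_identify_triggers := by
  intro ts d iv _
  unfold Spec_identify_triggers identify_triggers identify_triggers_alt
  have := main_lemma (pvGap d) iv ts.length ts le_rfl 0 0 []
  simp only [List.nil_append] at this
  simp [this]
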